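-- pv_equiv track=rewrite | github.com/shuan143/audvisproject | pronun/audio/gop_scorer.py | _get_frame_boundaries
-- ===== SOURCE A (Python) =====
-- def _get_frame_boundaries(predicted_ids: list[int], blank_id: int) -> list[tuple[int, int, int]]:
--     """Extract frame boundaries for each non-blank predicted token.
--
--     Returns list of (token_id, start_frame, end_frame).
--     """
--     segments = []
--     current_id = None
--     start = 0
--
--     for frame, tid in enumerate(predicted_ids):
--         if tid != current_id:
--             if current_id is not None and current_id != blank_id:
--                 segments.append((current_id, start, frame))
--             current_id = tid
--             start = frame
--
--     if current_id is not None and current_id != blank_id: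
--         segments.append((current_id, start, len(predicted_ids)))
--
--     return segments
-- ===== SOURCE B (Python) =====
-- def _get_frame_boundaries(predicted_ids: list[int], blank_id: int) -> list[tuple[int, int, int]]:
--     """Run-at-a-time scan: find each maximal run [start, end) directly,
--     instead of a per-frame state machine with a trailing flush."""
--     res = []
--     start = 0
--     n = len(predicted_ids)
--     while start < n:
--         tok = predicted_ids[start]
--         end = start + 1
--         while end < n and predicted_ids[end] == tok:
--             end += 1
--         if tok != blank_id:
--             res.append((tok, start, end))
--         start = end
--     return res
-- ===== Notes on version B (the rewrite author's own statement) =====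
-- stated objective: alternative
-- what changed: Replaces A's per-frame state machine (current_id/start bookkeeping plus a trailing flush) with a run-at-a-time scan that finds each maximal run's end index directly and emits the segment immediately.
import Mathlib
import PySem

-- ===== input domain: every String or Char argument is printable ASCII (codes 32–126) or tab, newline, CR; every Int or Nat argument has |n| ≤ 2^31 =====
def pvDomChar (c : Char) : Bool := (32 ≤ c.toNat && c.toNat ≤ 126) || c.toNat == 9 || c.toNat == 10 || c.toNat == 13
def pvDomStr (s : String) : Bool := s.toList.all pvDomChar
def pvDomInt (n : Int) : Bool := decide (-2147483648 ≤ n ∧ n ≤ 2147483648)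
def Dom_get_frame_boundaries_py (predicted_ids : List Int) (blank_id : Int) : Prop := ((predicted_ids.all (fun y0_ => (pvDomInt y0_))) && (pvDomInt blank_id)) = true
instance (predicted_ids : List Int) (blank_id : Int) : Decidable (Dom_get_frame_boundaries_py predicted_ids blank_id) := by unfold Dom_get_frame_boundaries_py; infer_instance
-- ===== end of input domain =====

-- B replaces A's per-frame state machine (current_id/start with a trailing flush) by a run-at-a-time
-- scan that finds each maximal run's end index directly (objective: alternative decomposition, same cost).

-- ===== PORT A =====
def loopA (blank_id : Int) : List Int → Int → List (Int × Int × Int) → Option Int → Int → (List (Int × Int × Int) × Option Int × Int)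
  | [], _, segments, current_id, start => (segments, current_id, start)
  | tid :: rest, frame, segments, current_id, start =>
    if current_id ≠ some tid then
      loopA blank_id rest (frame + 1)
        (match current_id with
         | some c => if c ≠ blank_id then segments ++ [(c, start, frame)] else segments
         | none => segments)
        (some tid) frame
    else loopA blank_id rest (frame + 1) segments current_id start

def get_frame_boundaries_py (predicted_ids : List Int) (blank_id : Int) : List (Int × Int × Int) :=
  match loopA blank_id predicted_ids 0 [] none 0 with
  | (segments, some c, start) =>
      if c ≠ blank_id then segments ++ [(c, start, (predicted_ids.length : Int))] else segments
  | (segments, none, _) => segments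

-- ===== PORT B =====
-- inner while loop of B: length of the leading run of `tok`
def runLen (tok : Int) : List Int → Nat
  | [] => 0
  | x :: xs => if x == tok then 1 + runLen tok xs else 0

-- outer while loop of B: peel one maximal run per step
def goB (blank_id : Int) (start : Int) : List Int → List (Int × Int × Int)
  | [] => []
  | tok :: xs =>
    let k : Nat := 1 + runLen tok xs
    (if tok ≠ blank_id then [(tok, start, start + (k : Int))] else []) ++
      goB blank_id (start + (k : Int)) (xs.drop (runLen tok xs))
termination_by xs => xs.length
decreasing_by simp [List.length_drop]

def get_frame_boundaries_py_alt (predicted_ids : List Int) (blank_id : Int) : List (Int × Int × Int) :=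
  goB blank_id 0 predicted_ids

-- ===== PRECONDITION & SPEC =====
def Spec_get_frame_boundaries_py (predicted_ids : List Int) (blank_id : Int) (out : List (Int × Int × Int)) : Prop := out = get_frame_boundaries_py_alt predicted_ids blank_id
instance (predicted_ids : List Int) (blank_id : Int) (out : List (Int × Int × Int)) : Decidable (Spec_get_frame_boundaries_py predicted_ids blank_id out) := by unfold Spec_get_frame_boundaries_py; infer_instance

-- ===== CLAIM (what is proved, stated in full; the proofs are below) =====
def Claim_equal_get_frame_boundaries_py : Prop := ∀ (predicted_ids : List Int) (blank_id : Int), Dom_get_frame_boundaries_py predicted_ids blank_id → Spec_get_frame_boundaries_py predicted_ids blank_id (get_frame_boundaries_py predicted_ids blank_id)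

-- ===== LEMMAS AND PROOFS =====

-- flush helper describing A's epilogue (proof-side only)
def finA (blank_id n : Int) : (List (Int × Int × Int) × Option Int × Int) → List (Int × Int × Int)
  | (segments, some c, start) => if c ≠ blank_id then segments ++ [(c, start, n)] else segments
  | (segments, none, _) => segments

lemma goB_nil (blank_id start : Int) : goB blank_id start [] = [] := by
  rw [goB.eq_def]

lemma goB_cons (blank_id start tok : Int) (xs : List Int) :
    goB blank_id start (tok :: xs) =
      (if tok ≠ blank_id then [(tok, start, start + ((1 + runLen tok xs : Nat) : Int))] else []) ++
        goB blank_id (start + ((1 + runLen tok xs : Nat) : Int)) (xs.drop (runLen tok xs)) := by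
  rw [goB.eq_def]

lemma loopA_run (blank_id : Int) : ∀ (l : List Int) (c start frame : Int) (seg : List (Int × Int × Int)),
    finA blank_id (frame + (l.length : Int)) (loopA blank_id l frame seg (some c) start)
      = seg ++ (if c ≠ blank_id then [(c, start, frame + (runLen c l : Int))] else [])
          ++ goB blank_id (frame + (runLen c l : Int)) (l.drop (runLen c l)) := by
  intro l
  induction l with
  | nil =>
      intro c start frame seg
      by_cases hc : c = blank_id <;> simp [loopA, finA, runLen, goB_nil, hc]
  | cons x xs ih =>
      intro c start frame seg
      by_cases hx : x = c
      · subst hx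
        have h1 : ¬ (some x ≠ some x) := by simp
        simp only [loopA, h1, if_false]
        have := ih x start (frame + 1) seg
        simp only [runLen, List.length_cons] at *
        simp only [if_pos (beq_self_eq_true x)] at *
        push_cast at this ⊢
        rw [show frame + ((xs.length : Int) + 1) = frame + 1 + (xs.length : Int) by ring]
        rw [this]
        have hd : List.drop (1 + runLen x xs) (x :: xs) = List.drop (runLen x xs) xs := by
          rw [Nat.add_comm]; simp
        rw [hd]
        rw [show frame + 1 + (runLen x xs : Int) = frame + (1 + (runLen x xs : Int)) by ring]
      · have h1 : some c ≠ some x := by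
          intro h; exact hx (Option.some.inj h).symm
        simp only [loopA, if_pos h1]
        have := ih x frame (frame + 1) (if c ≠ blank_id then seg ++ [(c, start, frame)] else seg)
        have hrun : runLen c (x :: xs) = 0 := by simp [runLen, hx]
        rw [hrun]
        simp only [List.length_cons, List.drop_zero, Nat.cast_zero, add_zero, Nat.cast_add,
          Nat.cast_one]
        rw [show frame + ((xs.length : Int) + 1) = frame + 1 + (xs.length : Int) by ring]
        rw [this]
        rw [goB_cons]
        push_cast
        rw [show frame + 1 + (runLen x xs : Int) = frame + (1 + (runLen x xs : Int)) by ring]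
        by_cases hc : c = blank_id <;> by_cases hb : x = blank_id <;>
          simp [hc, hb, List.append_assoc]

-- ===== VERDICT (by name: the statement is the Claim_ definition above) =====
theorem get_frame_boundaries_py_spec : Claim_equal_get_frame_boundaries_py := by
  intro predicted_ids blank_id _
  unfold Spec_get_frame_boundaries_py get_frame_boundaries_py get_frame_boundaries_py_alt
  cases predicted_ids with
  | nil => simp [loopA, goB_nil]
  | cons x xs =>
      have h1 : (none : Option Int) ≠ some x := by simp
      have hfin : ∀ st n, (match st with
          | (segments, some c, start) =>
              if c ≠ blank_id then segments ++ [(c, start, n)] else segments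
          | (segments, none, _) => segments) = finA blank_id n st := by
        intro st n; rcases st with ⟨seg, cur, start⟩; cases cur <;> rfl
      simp only [loopA, if_pos h1, zero_add]
      rw [hfin]
      rw [show (((x :: xs).length : Int)) = 1 + (xs.length : Int) by simp; ring]
      rw [loopA_run blank_id xs x 0 1 []]
      rw [goB_cons]
      push_cast
      simp [zero_add]
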